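-- pv_equiv track=rewrite | github.com/jiangchaokang/VectorWorld | tools/translate_repo_offline.py | find_yaml_comment_index
-- ===== SOURCE A (Python) =====
-- from typing import Dict, Iterable, Iterator, List, Optional, Sequence, Tuple
--
-- def find_yaml_comment_index(line: str) -> Optional[int]:
--     in_single = False
--     in_double = False
--     i = 0
--
--     while i < len(line):
--         ch = line[i]
--
--         if in_single:
--             if ch == "'" and i + 1 < len(line) and line[i + 1] == "'":
--                 i += 2
--                 continue
--             if ch == "'":
--                 in_single = False
--             i += 1
--             continue
--
--         if in_double:
--             if ch == "\\" and i + 1 < len(line):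
--                 i += 2
--                 continue
--             if ch == '"':
--                 in_double = False
--             i += 1
--             continue
--
--         if ch == "'":
--             in_single = True
--         elif ch == '"':
--             in_double = True
--         elif ch == "#":
--             prev = line[i - 1] if i > 0 else ""
--             if i == 0 or prev.isspace():
--                 return i
--
--         i += 1
--
--     return None
-- ===== SOURCE B (Python) =====
-- def _next_special(line, i):
--     # first index >= i holding one of ' " # , or -1 if none
--     j = -1
--     for c in "'\"#":
--         k = line.find(c, i)
--         if k != -1 and (j == -1 or k < j):
--             j = k
--     return j
--
--
-- def _skip_single(line, i):
--     # index just past a single-quoted region opened before i ('' is an escaped quote);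
--     # None if the quote is unterminated
--     while True:
--         k = line.find("'", i)
--         if k == -1:
--             return None
--         if k + 1 < len(line) and line[k + 1] == "'":
--             i = k + 2
--         else:
--             return k + 1
--
--
-- def _skip_double(line, i):
--     # index just past a double-quoted region opened before i (backslash escapes);
--     # None if the quote is unterminated
--     n = len(line)
--     while True:
--         kb = line.find("\\", i)
--         kq = line.find('"', i)
--         if kb != -1 and (kq == -1 or kb < kq):
--             if kb + 1 >= n:
--                 return None
--             i = kb + 2
--         elif kq == -1:
--             return None
--         else:
--             return kq + 1
--
--
-- def find_yaml_comment_index(line):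
--     i = 0
--     while True:
--         j = _next_special(line, i)
--         if j == -1:
--             return None
--         ch = line[j]
--         if ch == "#":
--             if j == 0 or line[j - 1].isspace():
--                 return j
--             i = j + 1
--         elif ch == "'":
--             nxt = _skip_single(line, j + 1)
--             if nxt is None:
--                 return None
--             i = nxt
--         else:
--             nxt = _skip_double(line, j + 1)
--             if nxt is None:
--                 return None
--             i = nxt
-- ===== Notes on version B (the rewrite author's own statement) =====
-- stated objective: faster
-- what changed: A walks the line one character at a time with in_single/in_double boolean state; B jumps between interesting characters with str.find, consuming whole quoted regions (with '' and backslash escapes) in dedicated skip loops and only inspecting quote/hash/backslash positions.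
import Mathlib
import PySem

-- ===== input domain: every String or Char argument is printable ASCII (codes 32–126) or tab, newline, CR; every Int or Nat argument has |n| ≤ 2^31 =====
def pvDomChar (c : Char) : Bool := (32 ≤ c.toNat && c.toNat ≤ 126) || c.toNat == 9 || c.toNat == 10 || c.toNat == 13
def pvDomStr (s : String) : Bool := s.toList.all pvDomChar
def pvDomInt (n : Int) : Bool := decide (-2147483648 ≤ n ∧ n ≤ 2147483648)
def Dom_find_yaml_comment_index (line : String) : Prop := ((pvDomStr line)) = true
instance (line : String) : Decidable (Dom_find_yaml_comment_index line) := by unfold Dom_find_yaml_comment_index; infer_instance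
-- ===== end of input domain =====

-- B replaces A's per-character quote-state machine by str.find jumps from one
-- special character to the next, consuming whole quoted regions in dedicated skip loops.
-- (fuel parameters are totality guards only: each loop advances its index, so
--  l.length + 1 unfoldings always suffice and the fuel-exhausted branch is unreachable)

-- ===== PORT A =====
-- A's while loop over index i with in_single/in_double state, one character at a time.
def goA (l : List Char) (i : Nat) (inS inD : Bool) (fuel : Nat) : Option Int :=
  match fuel with
  | 0 => none
  | fuel + 1 =>
    if i < l.length then
      let ch := l.getD i ' '
      if inS then
        if ch = '\'' ∧ (i + 1 < l.length ∧ l.getD (i + 1) ' ' = '\'') then goA l (i + 2) inS inD fuel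
        else if ch = '\'' then goA l (i + 1) false inD fuel
        else goA l (i + 1) inS inD fuel
      else if inD then
        if ch = '\\' ∧ i + 1 < l.length then goA l (i + 2) inS inD fuel
        else if ch = '"' then goA l (i + 1) inS false fuel
        else goA l (i + 1) inS inD fuel
      else if ch = '\'' then goA l (i + 1) true inD fuel
      else if ch = '"' then goA l (i + 1) inS true fuel
      else if ch = '#' ∧ (i = 0 ∨ PySem.Chars.isspace (l.getD (i - 1) ' ') = true) then some (i : Int)
      else goA l (i + 1) inS inD fuel
    else none

def find_yaml_comment_index (line : String) : Option Int :=
  goA line.toList 0 false false (line.toList.length + 1)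

-- ===== PORT B =====
-- Source B's _next_special: min over the three str.find results (the for loop unrolled
-- over the literal three-character string "'\"#").
def minFound (j k : Int) : Int := if k ≠ -1 ∧ (j = -1 ∨ k < j) then k else j

def nextSpecial (l : List Char) (i : Nat) : Int :=
  minFound (minFound (minFound (-1) (PySem.Chars.findFrom l ['\''] (i : Int) none))
      (PySem.Chars.findFrom l ['"'] (i : Int) none))
    (PySem.Chars.findFrom l ['#'] (i : Int) none)

-- Source B's _skip_single (the 'i ≤ l.length' test is part of the totality guard;
-- Python's index never exceeds len(line) on any call this file makes).
def skipSingle (l : List Char) (i : Nat) (fuel : Nat) : Option Nat :=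
  match fuel with
  | 0 => none
  | fuel + 1 =>
    if i ≤ l.length then
      let k := PySem.Chars.findFrom l ['\''] (i : Int) none
      if k = -1 then none
      else if k.toNat + 1 < l.length ∧ l.getD (k.toNat + 1) ' ' = '\'' then
        skipSingle l (k.toNat + 2) fuel
      else some (k.toNat + 1)
    else none

-- Source B's _skip_double ; same totality guard.
def skipDouble (l : List Char) (i : Nat) (fuel : Nat) : Option Nat :=
  match fuel with
  | 0 => none
  | fuel + 1 =>
    if i ≤ l.length then
      let kb := PySem.Chars.findFrom l ['\\'] (i : Int) none
      let kq := PySem.Chars.findFrom l ['"'] (i : Int) none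
      if kb ≠ -1 ∧ (kq = -1 ∨ kb < kq) then
        if kb.toNat + 1 ≥ l.length then none
        else skipDouble l (kb.toNat + 2) fuel
      else if kq = -1 then none
      else some (kq.toNat + 1)
    else none

-- Source B's outer loop.
def goB (l : List Char) (i : Nat) (fuel : Nat) : Option Int :=
  match fuel with
  | 0 => none
  | fuel + 1 =>
    if i ≤ l.length then
      if nextSpecial l i = -1 then none
      else
        let jn := (nextSpecial l i).toNat
        let ch := l.getD jn ' '
        if ch = '#' then
          if jn = 0 ∨ PySem.Chars.isspace (l.getD (jn - 1) ' ') = true then some (jn : Int)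
          else goB l (jn + 1) fuel
        else if ch = '\'' then
          match skipSingle l (jn + 1) (l.length + 1) with
          | none => none
          | some i' => goB l i' fuel
        else
          match skipDouble l (jn + 1) (l.length + 1) with
          | none => none
          | some i' => goB l i' fuel
    else none

def find_yaml_comment_index_alt (line : String) : Option Int :=
  goB line.toList 0 (line.toList.length + 1)

-- ===== PRECONDITION & SPEC =====
def Spec_find_yaml_comment_index (line : String) (out : Option Int) : Prop := out = find_yaml_comment_index_alt line
instance (line : String) (out : Option Int) : Decidable (Spec_find_yaml_comment_index line out) := by unfold Spec_find_yaml_comment_index; infer_instance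

-- ===== CLAIM (what is proved, stated in full; the proofs are below) =====
def Claim_equal_find_yaml_comment_index : Prop := ∀ (line : String), Dom_find_yaml_comment_index line → Spec_find_yaml_comment_index line (find_yaml_comment_index line)

-- ===== LEMMAS AND PROOFS =====

theorem ffChar_ge {l : List Char} {c : Char} {i : Nat} (hi : i ≤ l.length)
    (h : PySem.Chars.findFrom l [c] (i : Int) none ≠ -1) :
    i ≤ (PySem.Chars.findFrom l [c] (i : Int) none).toNat ∧
      (PySem.Chars.findFrom l [c] (i : Int) none).toNat < l.length := by
  obtain ⟨h1, h2, -⟩ := PySem.Chars.findFrom_natCast_spec l [c] i hi h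
  have hlt : (PySem.Chars.findFrom l [c] (i : Int) none).toNat < l.length := by
    rcases h2 with ⟨t, ht⟩
    have := congrArg List.length ht
    simp at this
    omega
  exact ⟨by omega, hlt⟩

theorem minFound_cases (j k : Int) : minFound j k = j ∨ minFound j k = k := by
  unfold minFound; split_ifs <;> simp

theorem nextSpecial_ge {l : List Char} {i : Nat} (hi : i ≤ l.length)
    (h : nextSpecial l i ≠ -1) :
    i ≤ (nextSpecial l i).toNat ∧ (nextSpecial l i).toNat < l.length := by
  have g : ∀ c : Char, PySem.Chars.findFrom l [c] (i : Int) none = -1 ∨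
      (i ≤ (PySem.Chars.findFrom l [c] (i : Int) none).toNat ∧
        (PySem.Chars.findFrom l [c] (i : Int) none).toNat < l.length) := by
    intro c
    by_cases hc : PySem.Chars.findFrom l [c] (i : Int) none = -1
    · exact Or.inl hc
    · exact Or.inr (ffChar_ge hi hc)
  unfold nextSpecial at h ⊢
  rcases minFound_cases (minFound (minFound (-1) (PySem.Chars.findFrom l ['\''] (i : Int) none))
      (PySem.Chars.findFrom l ['"'] (i : Int) none)) (PySem.Chars.findFrom l ['#'] (i : Int) none) with h3 | h3 <;>
    rw [h3] at h ⊢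
  · rcases minFound_cases (minFound (-1) (PySem.Chars.findFrom l ['\''] (i : Int) none))
        (PySem.Chars.findFrom l ['"'] (i : Int) none) with h2 | h2 <;> rw [h2] at h ⊢
    · rcases minFound_cases (-1 : Int) (PySem.Chars.findFrom l ['\''] (i : Int) none) with h1 | h1 <;>
        rw [h1] at h ⊢
      · exact absurd rfl h
      · exact (g '\'').resolve_left h
    · exact (g '"').resolve_left h
  · exact (g '#').resolve_left h

theorem singleton_infix_iff (c : Char) (t : List Char) : [c] <:+: t ↔ c ∈ t := by
  constructor
  · intro h; exact List.singleton_sublist.mp h.sublist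
  · intro h
    obtain ⟨s, u, rfl⟩ := List.append_of_mem h
    exact ⟨s, u, by simp⟩

theorem singleton_prefix_drop (l : List Char) (c : Char) (m : Nat) :
    [c] <+: l.drop m ↔ ∃ h : m < l.length, l[m] = c := by
  constructor
  · rintro ⟨t, ht⟩
    have hm : m < l.length := by
      by_contra hm
      rw [List.drop_eq_nil_of_le (by omega)] at ht
      simp at ht
    refine ⟨hm, ?_⟩
    rw [List.drop_eq_getElem_cons hm] at ht
    simp only [List.singleton_append] at ht
    injection ht with h1 _
    exact h1.symm
  · rintro ⟨hm, hc⟩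
    exact ⟨l.drop (m + 1), by rw [List.drop_eq_getElem_cons hm, hc]; rfl⟩

theorem ff_none_iff (l : List Char) (c : Char) (i : Nat) (hi : i ≤ l.length) :
    PySem.Chars.findFrom l [c] (i : Int) none = -1 ↔
      ∀ m, i ≤ m → ∀ hm : m < l.length, l[m] ≠ c := by
  rw [PySem.Chars.findFrom_natCast_eq_neg_one_iff l [c] i hi, singleton_infix_iff,
    List.mem_iff_getElem?]
  constructor
  · intro h m him hm hc
    refine h ⟨m - i, ?_⟩
    rw [List.getElem?_drop, show i + (m - i) = m from by omega]
    exact List.getElem?_eq_some_iff.mpr ⟨hm, hc⟩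
  · rintro h ⟨k, hk⟩
    rw [List.getElem?_drop] at hk
    obtain ⟨hlt, hc⟩ := List.getElem?_eq_some_iff.mp hk
    exact h (i + k) (by omega) hlt hc

theorem ff_some_spec (l : List Char) (c : Char) (i : Nat) (hi : i ≤ l.length)
    (h : PySem.Chars.findFrom l [c] (i : Int) none ≠ -1) :
    i ≤ (PySem.Chars.findFrom l [c] (i : Int) none).toNat ∧
      ∃ hK : (PySem.Chars.findFrom l [c] (i : Int) none).toNat < l.length,
        l[(PySem.Chars.findFrom l [c] (i : Int) none).toNat] = c ∧
          ∀ m, i ≤ m → m < (PySem.Chars.findFrom l [c] (i : Int) none).toNat →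
            ∀ hm : m < l.length, l[m] ≠ c := by
  obtain ⟨h1, h2, h3⟩ := PySem.Chars.findFrom_natCast_spec l [c] i hi h
  obtain ⟨hK, hc⟩ := (singleton_prefix_drop l c _).mp h2
  refine ⟨by omega, hK, hc, ?_⟩
  intro m him hmK hm hmc
  exact h3 m him hmK ((singleton_prefix_drop l c m).mpr ⟨hm, hmc⟩)

def isSpec (c : Char) : Prop := c = '\'' ∨ c = '"' ∨ c = '#'

theorem minFound_prop (j k : Int) :
    (j ≠ -1 → minFound j k ≠ -1 ∧ minFound j k ≤ j) ∧
      (k ≠ -1 → minFound j k ≠ -1 ∧ minFound j k ≤ k) ∧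
      (minFound j k = -1 → j = -1 ∧ k = -1) := by
  unfold minFound; split_ifs <;> omega

theorem ns_none_spec {l : List Char} {i : Nat} (hi : i ≤ l.length)
    (h : nextSpecial l i = -1) :
    ∀ m, i ≤ m → ∀ hm : m < l.length, ¬ isSpec l[m] := by
  unfold nextSpecial at h
  have p3 := (minFound_prop (minFound (minFound (-1) (PySem.Chars.findFrom l ['\''] (i : Int) none))
      (PySem.Chars.findFrom l ['"'] (i : Int) none)) (PySem.Chars.findFrom l ['#'] (i : Int) none)).2.2 h
  have p2 := (minFound_prop (minFound (-1) (PySem.Chars.findFrom l ['\''] (i : Int) none))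
      (PySem.Chars.findFrom l ['"'] (i : Int) none)).2.2 p3.1
  have p1 := (minFound_prop (-1) (PySem.Chars.findFrom l ['\''] (i : Int) none)).2.2 p2.1
  intro m him hm hs
  rcases hs with hc | hc | hc
  · exact (ff_none_iff l '\'' i hi).mp p1.2 m him hm hc
  · exact (ff_none_iff l '"' i hi).mp p2.2 m him hm hc
  · exact (ff_none_iff l '#' i hi).mp p3.2 m him hm hc

theorem ns_some_spec {l : List Char} {i : Nat} (hi : i ≤ l.length)
    (h : nextSpecial l i ≠ -1) :
    i ≤ (nextSpecial l i).toNat ∧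
      ∃ hK : (nextSpecial l i).toNat < l.length,
        isSpec l[(nextSpecial l i).toNat] ∧
          ∀ m, i ≤ m → m < (nextSpecial l i).toNat → ∀ hm : m < l.length, ¬ isSpec l[m] := by
  obtain ⟨hge, hlt⟩ := nextSpecial_ge hi h
  refine ⟨hge, hlt, ?_, ?_⟩
  · -- the found char is one of the three
    have hmem : ∃ c, isSpec c ∧ l[(nextSpecial l i).toNat]? = some c := by
      have h3 := minFound_cases (minFound (minFound (-1) (PySem.Chars.findFrom l ['\''] (i : Int) none))
          (PySem.Chars.findFrom l ['"'] (i : Int) none)) (PySem.Chars.findFrom l ['#'] (i : Int) none)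
      have h2 := minFound_cases (minFound (-1) (PySem.Chars.findFrom l ['\''] (i : Int) none))
          (PySem.Chars.findFrom l ['"'] (i : Int) none)
      have h1 := minFound_cases (-1 : Int) (PySem.Chars.findFrom l ['\''] (i : Int) none)
      unfold nextSpecial at h ⊢
      rcases h3 with h3 | h3 <;> rw [h3] at h ⊢
      · rcases h2 with h2 | h2 <;> rw [h2] at h ⊢
        · rcases h1 with h1 | h1 <;> rw [h1] at h ⊢
          · exact absurd rfl h
          · have hsp := ff_some_spec l '\'' i hi h
            exact ⟨'\'', Or.inl rfl, by rw [List.getElem?_eq_getElem hsp.2.1, hsp.2.2.1]⟩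
        · have hsp := ff_some_spec l '"' i hi h
          exact ⟨'"', Or.inr (Or.inl rfl), by rw [List.getElem?_eq_getElem hsp.2.1, hsp.2.2.1]⟩
      · have hsp := ff_some_spec l '#' i hi h
        exact ⟨'#', Or.inr (Or.inr rfl), by rw [List.getElem?_eq_getElem hsp.2.1, hsp.2.2.1]⟩
    obtain ⟨c, hcs, hc?⟩ := hmem
    have hce : l[(nextSpecial l i).toNat] = c := by
      have := List.getElem?_eq_getElem hlt
      rw [this] at hc?
      exact Option.some_injective _ hc?
    rw [hce]
    exact hcs
  · -- minimality
    intro m him hmK hm hs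
    have le1 : ∀ c : Char, PySem.Chars.findFrom l [c] (i : Int) none ≠ -1 →
        (nextSpecial l i) ≤ PySem.Chars.findFrom l [c] (i : Int) none → False → True := fun _ _ _ _ => trivial
    -- nextSpecial ≤ every found index
    have key : ∀ c : Char, (c = '\'' ∨ c = '"' ∨ c = '#') → l[m] = c → False := by
      intro c hcs hc
      have hne : PySem.Chars.findFrom l [c] (i : Int) none = -1 → False := by
        intro hn
        exact (ff_none_iff l c i hi).mp hn m him hm hc
      by_cases hn : PySem.Chars.findFrom l [c] (i : Int) none = -1
      · exact hne hn
      · -- m < nextSpecial ≤ find c, but minimality of find c says no c before it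
        have hsp := ff_some_spec l c i hi hn
        have hle : nextSpecial l i ≤ PySem.Chars.findFrom l [c] (i : Int) none := by
          unfold nextSpecial
          have q3 := minFound_prop (minFound (minFound (-1) (PySem.Chars.findFrom l ['\''] (i : Int) none))
              (PySem.Chars.findFrom l ['"'] (i : Int) none)) (PySem.Chars.findFrom l ['#'] (i : Int) none)
          have q2 := minFound_prop (minFound (-1) (PySem.Chars.findFrom l ['\''] (i : Int) none))
              (PySem.Chars.findFrom l ['"'] (i : Int) none)
          have q1 := minFound_prop (-1 : Int) (PySem.Chars.findFrom l ['\''] (i : Int) none)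
          rcases hcs with rfl | rfl | rfl
          · have := (q1.2.1 hn)
            have := (q2.1 this.1)
            have := (q3.1 this.1)
            omega
          · have := (q2.2.1 hn)
            have := (q3.1 this.1)
            omega
          · have := (q3.2.1 hn)
            omega
        have hmlt : m < (PySem.Chars.findFrom l [c] (i : Int) none).toNat := by omega
        exact hsp.2.2.2 m him hmlt hm hc
    rcases hs with hc | hc | hc
    · exact key _ (Or.inl rfl) hc
    · exact key _ (Or.inr (Or.inl rfl)) hc
    · exact key _ (Or.inr (Or.inr rfl)) hc

theorem getD_eq_getElem' (l : List Char) (m : Nat) (hm : m < l.length) :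
    l.getD m ' ' = l[m] := by
  rw [List.getD_eq_getElem?_getD, List.getElem?_eq_getElem hm]
  rfl


theorem goA_end (l : List Char) (i : Nat) (s d : Bool) (f : Nat) (h : l.length ≤ i) :
    goA l i s d f = none := by
  cases f with
  | zero => rfl
  | succ f => simp only [goA, if_neg (by omega : ¬ i < l.length)]

theorem goA_fuel (l : List Char) (f : Nat) : ∀ (i : Nat) (s d : Bool),
    l.length + 1 ≤ i + f → goA l i s d f = goA l i s d (l.length + 1 - i) := by
  induction f using Nat.strong_induction_on with
  | _ f ih =>
    rcases f with _ | f
    · intro i s d hf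
      rw [show l.length + 1 - i = 0 from by omega]
    · intro i s d hf
      by_cases hi : i < l.length
      · rw [show l.length + 1 - i = (l.length - i) + 1 from by omega]
        have key : ∀ (i' : Nat) (s' d' : Bool), l.length + 1 ≤ i' + f →
            l.length + 1 ≤ i' + (l.length - i) →
            goA l i' s' d' f = goA l i' s' d' (l.length - i) := by
          intro i' s' d' h1 h2
          rw [ih f (by omega) i' s' d' h1, ih (l.length - i) (by omega) i' s' d' h2]
        simp only [goA, if_pos hi]
        split_ifs <;> first | rfl | exact key _ _ _ (by omega) (by omega)
      · rw [goA_end l i s d _ (by omega), goA_end l i s d _ (by omega)]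

theorem skipSingle_fuel (l : List Char) (f : Nat) : ∀ (i : Nat),
    l.length + 1 ≤ i + f → skipSingle l i f = skipSingle l i (l.length + 1 - i) := by
  induction f using Nat.strong_induction_on with
  | _ f ih =>
    rcases f with _ | f
    · intro i hf
      rw [show l.length + 1 - i = 0 from by omega]
    · intro i hf
      by_cases hi : i ≤ l.length
      · rw [show l.length + 1 - i = (l.length - i) + 1 from by omega]
        simp only [skipSingle, if_pos hi]
        split_ifs with hk hc
        · rfl
        · have hb := ffChar_ge hi hk
          rw [ih f (by omega) _ (by omega), ih (l.length - i) (by omega) _ (by omega)]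
        · rfl
      · rw [show l.length + 1 - i = 0 from by omega]
        simp only [skipSingle, if_neg hi]

theorem skipDouble_fuel (l : List Char) (f : Nat) : ∀ (i : Nat),
    l.length + 1 ≤ i + f → skipDouble l i f = skipDouble l i (l.length + 1 - i) := by
  induction f using Nat.strong_induction_on with
  | _ f ih =>
    rcases f with _ | f
    · intro i hf
      rw [show l.length + 1 - i = 0 from by omega]
    · intro i hf
      by_cases hi : i ≤ l.length
      · rw [show l.length + 1 - i = (l.length - i) + 1 from by omega]
        simp only [skipDouble, if_pos hi]
        split_ifs with hb hge hq
        · rfl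
        · have hbb := ffChar_ge hi hb.1
          rw [ih f (by omega) _ (by omega), ih (l.length - i) (by omega) _ (by omega)]
        · rfl
        · rfl
      · rw [show l.length + 1 - i = 0 from by omega]
        simp only [skipDouble, if_neg hi]

theorem skipSingle_bounds (l : List Char) (f : Nat) : ∀ (i r : Nat),
    skipSingle l i f = some r → i < r ∧ r ≤ l.length := by
  induction f with
  | zero => intro i r h; exact absurd h (by simp [skipSingle])
  | succ f ih =>
      intro i r h
      simp only [skipSingle] at h
      split_ifs at h with hi hk hc
      · have hb := ffChar_ge hi hk
        have := ih _ r h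
        omega
      · have hb := ffChar_ge hi hk
        simp only [Option.some.injEq] at h
        omega

theorem skipDouble_bounds (l : List Char) (f : Nat) : ∀ (i r : Nat),
    skipDouble l i f = some r → i < r ∧ r ≤ l.length := by
  induction f with
  | zero => intro i r h; exact absurd h (by simp [skipDouble])
  | succ f ih =>
      intro i r h
      simp only [skipDouble] at h
      split_ifs at h with hi hb hge hq
      · have hbb := ffChar_ge hi hb.1
        have := ih _ r h
        omega
      · have hbb := ffChar_ge hi hq
        simp only [Option.some.injEq] at h
        omega

theorem goB_fuel (l : List Char) (f : Nat) : ∀ (i : Nat),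
    l.length + 1 ≤ i + f → goB l i f = goB l i (l.length + 1 - i) := by
  induction f using Nat.strong_induction_on with
  | _ f ih =>
    rcases f with _ | f
    · intro i hf
      rw [show l.length + 1 - i = 0 from by omega]
    · intro i hf
      by_cases hi : i ≤ l.length
      · rw [show l.length + 1 - i = (l.length - i) + 1 from by omega]
        have key : ∀ (i' : Nat), l.length + 1 ≤ i' + f → l.length + 1 ≤ i' + (l.length - i) →
            goB l i' f = goB l i' (l.length - i) := by
          intro i' h1 h2
          rw [ih f (by omega) i' h1, ih (l.length - i) (by omega) i' h2]
        simp only [goB, if_pos hi]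
        split_ifs with hj hch hcm hcq
        · rfl
        · rfl
        · have hjn := nextSpecial_ge hi hj
          exact key _ (by omega) (by omega)
        · cases hss : skipSingle l ((nextSpecial l i).toNat + 1) (l.length + 1) with
          | none => rfl
          | some i' =>
              have hjn := nextSpecial_ge hi hj
              have hb := skipSingle_bounds l (l.length + 1) _ i' hss
              exact key _ (by omega) (by omega)
        · cases hss : skipDouble l ((nextSpecial l i).toNat + 1) (l.length + 1) with
          | none => rfl
          | some i' =>
              have hjn := nextSpecial_ge hi hj
              have hb := skipDouble_bounds l (l.length + 1) _ i' hss
              exact key _ (by omega) (by omega)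
      · rw [show l.length + 1 - i = 0 from by omega]
        simp only [goB, if_neg hi]

theorem goA_out_step (l : List Char) (m : Nat) (hm : m < l.length)
    (h : ¬ isSpec (l.getD m ' ')) :
    goA l m false false (l.length + 1 - m) = goA l (m + 1) false false (l.length + 1 - (m + 1)) := by
  have h1 : ¬ l.getD m ' ' = '\'' := fun hc => h (Or.inl hc)
  have h2 : ¬ l.getD m ' ' = '"' := fun hc => h (Or.inr (Or.inl hc))
  have h3 : ¬ l.getD m ' ' = '#' := fun hc => h (Or.inr (Or.inr hc))
  rw [show l.length + 1 - m = (l.length - m) + 1 from by omega,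
    show l.length + 1 - (m + 1) = l.length - m from by omega]
  simp only [goA, if_pos hm, Bool.false_eq_true, if_false]
  rw [if_neg h1, if_neg h2, if_neg (fun hc => h3 hc.1)]

theorem goA_single_step (l : List Char) (m : Nat) (hm : m < l.length)
    (h : ¬ l.getD m ' ' = '\'') :
    goA l m true false (l.length + 1 - m) = goA l (m + 1) true false (l.length + 1 - (m + 1)) := by
  rw [show l.length + 1 - m = (l.length - m) + 1 from by omega,
    show l.length + 1 - (m + 1) = l.length - m from by omega]
  simp only [goA, if_pos hm, if_true]
  rw [if_neg (fun hc => h hc.1), if_neg h]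

theorem goA_double_step (l : List Char) (m : Nat) (hm : m < l.length)
    (h1 : ¬ l.getD m ' ' = '\\') (h2 : ¬ l.getD m ' ' = '"') :
    goA l m false true (l.length + 1 - m) = goA l (m + 1) false true (l.length + 1 - (m + 1)) := by
  rw [show l.length + 1 - m = (l.length - m) + 1 from by omega,
    show l.length + 1 - (m + 1) = l.length - m from by omega]
  simp only [goA, if_pos hm, Bool.false_eq_true, if_false, if_true]
  rw [if_neg (fun hc => h1 hc.1), if_neg h2]

theorem goA_out_skip (l : List Char) (i j : Nat) (hij : i ≤ j) (hj : j ≤ l.length)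
    (h : ∀ m, i ≤ m → m < j → ∀ hm : m < l.length, ¬ isSpec l[m]) :
    goA l i false false (l.length + 1 - i) = goA l j false false (l.length + 1 - j) := by
  induction j, hij using Nat.le_induction with
  | base => rfl
  | succ j hij ih =>
      have hjl : j < l.length := by omega
      rw [ih (by omega) (fun m h1 h2 hm => h m h1 (by omega) hm)]
      exact goA_out_step l j hjl (by rw [getD_eq_getElem' l j hjl]; exact h j hij (by omega) hjl)

theorem goA_single_skip (l : List Char) (i j : Nat) (hij : i ≤ j) (hj : j ≤ l.length)
    (h : ∀ m, i ≤ m → m < j → ∀ hm : m < l.length, l[m] ≠ '\'') :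
    goA l i true false (l.length + 1 - i) = goA l j true false (l.length + 1 - j) := by
  induction j, hij using Nat.le_induction with
  | base => rfl
  | succ j hij ih =>
      have hjl : j < l.length := by omega
      rw [ih (by omega) (fun m h1 h2 hm => h m h1 (by omega) hm)]
      exact goA_single_step l j hjl (by rw [getD_eq_getElem' l j hjl]; exact h j hij (by omega) hjl)

theorem goA_double_skip (l : List Char) (i j : Nat) (hij : i ≤ j) (hj : j ≤ l.length)
    (h : ∀ m, i ≤ m → m < j → ∀ hm : m < l.length, l[m] ≠ '\\' ∧ l[m] ≠ '"') :
    goA l i false true (l.length + 1 - i) = goA l j false true (l.length + 1 - j) := by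
  induction j, hij using Nat.le_induction with
  | base => rfl
  | succ j hij ih =>
      have hjl : j < l.length := by omega
      rw [ih (by omega) (fun m h1 h2 hm => h m h1 (by omega) hm)]
      exact goA_double_step l j hjl
        (by rw [getD_eq_getElem' l j hjl]; exact (h j hij (by omega) hjl).1)
        (by rw [getD_eq_getElem' l j hjl]; exact (h j hij (by omega) hjl).2)

theorem singleQ (l : List Char) (n : Nat) : ∀ (i : Nat), n = l.length + 1 - i → i ≤ l.length →
    goA l i true false (l.length + 1 - i) =
      (skipSingle l i (l.length + 1 - i)).elim none
        (fun r => goA l r false false (l.length + 1 - r)) := by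
  induction n using Nat.strong_induction_on with
  | _ n ih =>
    intro i hn hi
    by_cases hk : PySem.Chars.findFrom l ['\''] (i : Int) none = -1
    · have hnone := (ff_none_iff l '\'' i hi).mp hk
      rw [goA_single_skip l i l.length hi le_rfl (fun m h1 h2 hm => hnone m h1 hm),
        goA_end l l.length true false _ le_rfl,
        show l.length + 1 - i = (l.length - i) + 1 from by omega]
      simp only [skipSingle, if_pos hi, if_pos hk]
      rfl
    · obtain ⟨hge, hK, hcK, hmin⟩ := ff_some_spec l '\'' i hi hk
      rw [goA_single_skip l i _ hge (by omega) (fun m h1 h2 hm => hmin m h1 h2 hm),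
        show l.length + 1 - i = (l.length - i) + 1 from by omega]
      simp only [skipSingle, if_pos hi, if_neg hk]
      by_cases hc : (PySem.Chars.findFrom l ['\''] (i : Int) none).toNat + 1 < l.length ∧
          l.getD ((PySem.Chars.findFrom l ['\''] (i : Int) none).toNat + 1) ' ' = '\''
      · rw [if_pos hc,
          show l.length + 1 - (PySem.Chars.findFrom l ['\''] (i : Int) none).toNat
            = (l.length - (PySem.Chars.findFrom l ['\''] (i : Int) none).toNat) + 1 from by omega]
        simp only [goA, if_pos hK, if_true]
        rw [if_pos ⟨(by rw [getD_eq_getElem' _ _ hK]; exact hcK), hc⟩,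
          goA_fuel l (l.length - (PySem.Chars.findFrom l ['\''] (i : Int) none).toNat)
            _ true false (by omega),
          skipSingle_fuel l (l.length - i) _ (by omega)]
        exact ih (l.length + 1 - ((PySem.Chars.findFrom l ['\''] (i : Int) none).toNat + 2))
          (by omega) _ rfl (by omega)
      · rw [if_neg hc,
          show l.length + 1 - (PySem.Chars.findFrom l ['\''] (i : Int) none).toNat
            = (l.length - (PySem.Chars.findFrom l ['\''] (i : Int) none).toNat) + 1 from by omega]
        simp only [goA, if_pos hK, if_true]
        rw [if_neg (fun hcc => hc hcc.2),
          if_pos (by rw [getD_eq_getElem' _ _ hK]; exact hcK),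
          show l.length - (PySem.Chars.findFrom l ['\''] (i : Int) none).toNat
            = l.length + 1 - ((PySem.Chars.findFrom l ['\''] (i : Int) none).toNat + 1) from by omega]
        rfl

theorem doubleQ (l : List Char) (n : Nat) : ∀ (i : Nat), n = l.length + 1 - i → i ≤ l.length →
    goA l i false true (l.length + 1 - i) =
      (skipDouble l i (l.length + 1 - i)).elim none
        (fun r => goA l r false false (l.length + 1 - r)) := by
  induction n using Nat.strong_induction_on with
  | _ n ih =>
    intro i hn hi
    by_cases hb : PySem.Chars.findFrom l ['\\'] (i : Int) none ≠ -1 ∧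
        (PySem.Chars.findFrom l ['"'] (i : Int) none = -1 ∨
          PySem.Chars.findFrom l ['\\'] (i : Int) none < PySem.Chars.findFrom l ['"'] (i : Int) none)
    · obtain ⟨hgeb, hKb, hcKb, hminb⟩ := ff_some_spec l '\\' i hi hb.1
      have hmin2 : ∀ m, i ≤ m → m < (PySem.Chars.findFrom l ['\\'] (i : Int) none).toNat →
          ∀ hm : m < l.length, l[m] ≠ '\\' ∧ l[m] ≠ '"' := by
        intro m h1 h2 hm
        refine ⟨hminb m h1 h2 hm, ?_⟩
        rcases hb.2 with hq | hq
        · exact (ff_none_iff l '"' i hi).mp hq m h1 hm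
        · obtain ⟨-, -, -, hminq⟩ := ff_some_spec l '"' i hi (by omega)
          exact hminq m h1 (by omega) hm
      rw [goA_double_skip l i _ hgeb (by omega) hmin2,
        show l.length + 1 - i = (l.length - i) + 1 from by omega]
      simp only [skipDouble, if_pos hi]
      rw [if_pos hb]
      by_cases hge : (PySem.Chars.findFrom l ['\\'] (i : Int) none).toNat + 1 ≥ l.length
      · rw [if_pos hge,
          show l.length + 1 - (PySem.Chars.findFrom l ['\\'] (i : Int) none).toNat
            = (l.length - (PySem.Chars.findFrom l ['\\'] (i : Int) none).toNat) + 1 from by omega]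
        simp only [goA, if_pos hKb, Bool.false_eq_true, if_false, if_true]
        rw [if_neg (fun hcc => absurd hcc.2 (by omega)),
          if_neg (by rw [getD_eq_getElem' _ _ hKb, hcKb]; decide),
          goA_end l _ false true _ (by omega)]
        rfl
      · rw [if_neg hge,
          show l.length + 1 - (PySem.Chars.findFrom l ['\\'] (i : Int) none).toNat
            = (l.length - (PySem.Chars.findFrom l ['\\'] (i : Int) none).toNat) + 1 from by omega]
        simp only [goA, if_pos hKb, Bool.false_eq_true, if_false, if_true]
        rw [if_pos ⟨(by rw [getD_eq_getElem' _ _ hKb]; exact hcKb), by omega⟩,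
          goA_fuel l (l.length - (PySem.Chars.findFrom l ['\\'] (i : Int) none).toNat)
            _ false true (by omega),
          skipDouble_fuel l (l.length - i) _ (by omega)]
        exact ih (l.length + 1 - ((PySem.Chars.findFrom l ['\\'] (i : Int) none).toNat + 2))
          (by omega) _ rfl (by omega)
    · by_cases hq : PySem.Chars.findFrom l ['"'] (i : Int) none = -1
      · have hkb : PySem.Chars.findFrom l ['\\'] (i : Int) none = -1 := by
          by_contra hne
          exact hb ⟨hne, Or.inl hq⟩
        have hnb := (ff_none_iff l '\\' i hi).mp hkb
        have hnq := (ff_none_iff l '"' i hi).mp hq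
        rw [goA_double_skip l i l.length hi le_rfl
            (fun m h1 h2 hm => ⟨hnb m h1 hm, hnq m h1 hm⟩),
          goA_end l l.length false true _ le_rfl,
          show l.length + 1 - i = (l.length - i) + 1 from by omega]
        simp only [skipDouble, if_pos hi]
        rw [if_neg hb, if_pos hq]
        rfl
      · obtain ⟨hgeq, hKq, hcKq, hminq⟩ := ff_some_spec l '"' i hi hq
        have hmin2 : ∀ m, i ≤ m → m < (PySem.Chars.findFrom l ['"'] (i : Int) none).toNat →
            ∀ hm : m < l.length, l[m] ≠ '\\' ∧ l[m] ≠ '"' := by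
          intro m h1 h2 hm
          refine ⟨?_, hminq m h1 h2 hm⟩
          by_cases hkb : PySem.Chars.findFrom l ['\\'] (i : Int) none = -1
          · exact (ff_none_iff l '\\' i hi).mp hkb m h1 hm
          · have hle : PySem.Chars.findFrom l ['"'] (i : Int) none ≤
                PySem.Chars.findFrom l ['\\'] (i : Int) none := by
              by_contra hlt
              exact hb ⟨hkb, Or.inr (by omega)⟩
            obtain ⟨hgeb, hKb, -, hminb⟩ := ff_some_spec l '\\' i hi hkb
            exact hminb m h1 (by omega) hm
        rw [goA_double_skip l i _ hgeq (by omega) hmin2,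
          show l.length + 1 - i = (l.length - i) + 1 from by omega]
        simp only [skipDouble, if_pos hi]
        rw [if_neg hb, if_neg hq,
          show l.length + 1 - (PySem.Chars.findFrom l ['"'] (i : Int) none).toNat
            = (l.length - (PySem.Chars.findFrom l ['"'] (i : Int) none).toNat) + 1 from by omega]
        simp only [goA, if_pos hKq, Bool.false_eq_true, if_false, if_true]
        rw [if_neg (fun hcc => absurd hcc.1 (by rw [getD_eq_getElem' _ _ hKq, hcKq]; decide)),
          if_pos (by rw [getD_eq_getElem' _ _ hKq]; exact hcKq),
          show l.length - (PySem.Chars.findFrom l ['"'] (i : Int) none).toNat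
            = l.length + 1 - ((PySem.Chars.findFrom l ['"'] (i : Int) none).toNat + 1) from by omega]
        rfl

theorem main_goA_eq_goB (l : List Char) (n : Nat) : ∀ (i : Nat), n = l.length + 1 - i →
    i ≤ l.length → goA l i false false (l.length + 1 - i) = goB l i (l.length + 1 - i) := by
  induction n using Nat.strong_induction_on with
  | _ n ih =>
    intro i hn hi
    by_cases hj : nextSpecial l i = -1
    · have hB : goB l i (l.length + 1 - i) = none := by
        rw [show l.length + 1 - i = (l.length - i) + 1 from by omega]
        simp only [goB, if_pos hi, if_pos hj]
      rw [hB,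
        goA_out_skip l i l.length hi le_rfl (fun m hm1 _ hm2 => ns_none_spec hi hj m hm1 hm2),
        goA_end l l.length false false _ le_rfl]
    · obtain ⟨hge, hK, hspec, hmin⟩ := ns_some_spec hi hj
      have hsD : isSpec (l.getD (nextSpecial l i).toNat ' ') := by
        rw [getD_eq_getElem' _ _ hK]; exact hspec
      by_cases hch : l.getD (nextSpecial l i).toNat ' ' = '#'
      · by_cases hcm : (nextSpecial l i).toNat = 0 ∨
            PySem.Chars.isspace (l.getD ((nextSpecial l i).toNat - 1) ' ') = true
        · have hB : goB l i (l.length + 1 - i) = some ((nextSpecial l i).toNat : Int) := by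
            rw [show l.length + 1 - i = (l.length - i) + 1 from by omega]
            simp only [goB, if_pos hi, if_neg hj]
            rw [if_pos hch, if_pos hcm]
          rw [hB, goA_out_skip l i _ hge (by omega) hmin,
            show l.length + 1 - (nextSpecial l i).toNat
              = (l.length - (nextSpecial l i).toNat) + 1 from by omega]
          simp only [goA, if_pos hK, Bool.false_eq_true, if_false]
          rw [if_neg (by rw [hch]; decide), if_neg (by rw [hch]; decide), if_pos ⟨hch, hcm⟩]
        · have hB : goB l i (l.length + 1 - i)
              = goB l ((nextSpecial l i).toNat + 1) (l.length + 1 - ((nextSpecial l i).toNat + 1)) := by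
            rw [show l.length + 1 - i = (l.length - i) + 1 from by omega]
            simp only [goB, if_pos hi, if_neg hj]
            rw [if_pos hch, if_neg hcm, goB_fuel l (l.length - i) _ (by omega)]
          rw [hB, goA_out_skip l i _ hge (by omega) hmin,
            show l.length + 1 - (nextSpecial l i).toNat
              = (l.length - (nextSpecial l i).toNat) + 1 from by omega]
          simp only [goA, if_pos hK, Bool.false_eq_true, if_false]
          rw [if_neg (by rw [hch]; decide), if_neg (by rw [hch]; decide),
            if_neg (fun hcc => hcm hcc.2),
            show l.length - (nextSpecial l i).toNat
              = l.length + 1 - ((nextSpecial l i).toNat + 1) from by omega]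
          exact ih (l.length + 1 - ((nextSpecial l i).toNat + 1)) (by omega) _ rfl (by omega)
      · by_cases hcq : l.getD (nextSpecial l i).toNat ' ' = '\''
        · have hB : goB l i (l.length + 1 - i)
              = match skipSingle l ((nextSpecial l i).toNat + 1) (l.length + 1) with
                | none => none
                | some i' => goB l i' (l.length - i) := by
            rw [show l.length + 1 - i = (l.length - i) + 1 from by omega]
            simp only [goB, if_pos hi, if_neg hj]
            rw [if_neg hch, if_pos hcq]
          rw [hB, skipSingle_fuel l (l.length + 1) _ (by omega),
            goA_out_skip l i _ hge (by omega) hmin,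
            show l.length + 1 - (nextSpecial l i).toNat
              = (l.length - (nextSpecial l i).toNat) + 1 from by omega]
          simp only [goA, if_pos hK, Bool.false_eq_true, if_false]
          rw [if_pos hcq,
            show l.length - (nextSpecial l i).toNat
              = l.length + 1 - ((nextSpecial l i).toNat + 1) from by omega,
            singleQ l (l.length + 1 - ((nextSpecial l i).toNat + 1)) _ rfl (by omega)]
          cases hss : skipSingle l ((nextSpecial l i).toNat + 1)
              (l.length + 1 - ((nextSpecial l i).toNat + 1)) with
          | none => rfl
          | some i' =>
              have hbnd := skipSingle_bounds l _ _ i' hss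
              exact (ih (l.length + 1 - i') (by omega) i' rfl (by omega)).trans
                (goB_fuel l (l.length - i) i' (by omega)).symm
        · have hdq : l.getD (nextSpecial l i).toNat ' ' = '"' := by
            rcases hsD with h | h | h
            · exact absurd h hcq
            · exact h
            · exact absurd h hch
          have hB : goB l i (l.length + 1 - i)
              = match skipDouble l ((nextSpecial l i).toNat + 1) (l.length + 1) with
                | none => none
                | some i' => goB l i' (l.length - i) := by
            rw [show l.length + 1 - i = (l.length - i) + 1 from by omega]
            simp only [goB, if_pos hi, if_neg hj]
            rw [if_neg hch, if_neg hcq]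
          rw [hB, skipDouble_fuel l (l.length + 1) _ (by omega),
            goA_out_skip l i _ hge (by omega) hmin,
            show l.length + 1 - (nextSpecial l i).toNat
              = (l.length - (nextSpecial l i).toNat) + 1 from by omega]
          simp only [goA, if_pos hK, Bool.false_eq_true, if_false]
          rw [if_neg hcq, if_pos hdq,
            show l.length - (nextSpecial l i).toNat
              = l.length + 1 - ((nextSpecial l i).toNat + 1) from by omega,
            doubleQ l (l.length + 1 - ((nextSpecial l i).toNat + 1)) _ rfl (by omega)]
          cases hss : skipDouble l ((nextSpecial l i).toNat + 1)
              (l.length + 1 - ((nextSpecial l i).toNat + 1)) with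
          | none => rfl
          | some i' =>
              have hbnd := skipDouble_bounds l _ _ i' hss
              exact (ih (l.length + 1 - i') (by omega) i' rfl (by omega)).trans
                (goB_fuel l (l.length - i) i' (by omega)).symm

-- ===== VERDICT (by name: the statement is the Claim_ definition above) =====
theorem find_yaml_comment_index_spec : Claim_equal_find_yaml_comment_index := by
  intro line _
  unfold Spec_find_yaml_comment_index find_yaml_comment_index find_yaml_comment_index_alt
  have h := main_goA_eq_goB line.toList (line.toList.length + 1) 0 (by omega) (by omega)
  simpa using h
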